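-- pv_equiv track=rewrite | github.com/THU-KEG/OmniEvent | scripts/data_processing/ace2005-en/ace2005-en.py | correct_offsets
-- ===== SOURCE A (Python) =====
-- from typing import List, Optional
--
-- def correct_offsets(
--                     sents: List[str],
--                     offsets):
--     """Corrects the offsets of sentences after removing xml elements."""
--     new_offsets = []
--     minus = 0
--     for i, offsets_per_sentence in enumerate(offsets):
--         sentence = sents[i]
--         new_offsets_per_sentence = []
--         for j, offset in enumerate(offsets_per_sentence):
--             if sentence[j].startswith('<'):
--                 new_offsets_per_sentence.append((0, 0))
--                 minus += len(sentence[j])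
--
--             else:
--                 new_offsets_per_sentence.append((offset[0] - minus, offset[1] - minus))
--         new_offsets.append(new_offsets_per_sentence)
--     return sents, new_offsets
-- ===== SOURCE B (Python) =====
-- def correct_offsets(sents, offsets):
--     """Corrects the offsets of sentences after removing xml elements."""
--     # Pass 1: one flat flag per token (in global order): does its character start with '<'?
--     flags = [c == '<' for s, ops in zip(sents, offsets) for c, _ in zip(s, ops)]
--     # Global prefix-sum table: before[k] = total length of xml tokens strictly
--     # before flattened position k (each xml token here is a single character).
--     before = [0]
--     for f in flags:
--         before.append(before[-1] + (1 if f else 0))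
--     # Pass 2: pure table lookups, re-nested per sentence.
--     new_offsets = []
--     k = 0
--     for ops in offsets:
--         new_offsets.append([(0, 0) if flags[k + j] else (a - before[k + j], b - before[k + j])
--                             for j, (a, b) in enumerate(ops)])
--         k += len(ops)
--     return sents, new_offsets
-- ===== Notes on version B (the rewrite author's own statement) =====
-- stated objective: alternative
-- what changed: Replaces A's single nested loop with a running `minus` accumulator by a two-pass design: a flat pass builds a global prefix-sum table of xml-token lengths over the flattened token stream, then a second pass produces each row by pure table lookups (flags[k+j]/before[k+j]) instead of threading mutable state through the sentences.
import Mathlib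
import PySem

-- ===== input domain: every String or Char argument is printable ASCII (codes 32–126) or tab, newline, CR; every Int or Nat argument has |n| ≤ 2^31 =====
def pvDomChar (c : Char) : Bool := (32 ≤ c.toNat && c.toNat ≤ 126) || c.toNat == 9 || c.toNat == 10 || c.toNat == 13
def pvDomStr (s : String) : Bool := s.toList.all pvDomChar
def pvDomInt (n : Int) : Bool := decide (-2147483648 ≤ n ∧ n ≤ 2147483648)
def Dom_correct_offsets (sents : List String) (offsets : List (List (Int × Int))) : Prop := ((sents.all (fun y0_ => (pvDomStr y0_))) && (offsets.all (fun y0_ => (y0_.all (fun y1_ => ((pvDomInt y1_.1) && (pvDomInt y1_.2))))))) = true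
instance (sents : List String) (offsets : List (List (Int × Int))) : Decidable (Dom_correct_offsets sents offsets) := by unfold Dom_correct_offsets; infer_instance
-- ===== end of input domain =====

-- B replaces A's running `minus` accumulator by a precomputed global prefix-sum table and a
-- second pure-lookup pass (objective: alternative decomposition); return values agree on Pre_.

-- ===== PORT A =====
-- inner `for j, offset in enumerate(offsets_per_sentence)` loop, carrying `minus`;
-- Python's sentence[j] is a one-char string, so `.startswith('<')` ⟺ that char is '<'
-- and `len(sentence[j])` = 1; PySem.Str.pyGet? returns none exactly where Python raises
-- IndexError (those inputs are outside Pre_; the port then just stops with the state).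
def pvInnerA (sentence : String) (ops : List (Int × Int)) (j : Int) (minus : Int) :
    List (Int × Int) × Int :=
  match ops with
  | [] => ([], minus)
  | off :: rest =>
    match PySem.Str.pyGet? sentence j with
    | none => ([], minus)  -- IndexError in Python: outside Pre_
    | some c =>
      if c = '<' then
        let r := pvInnerA sentence rest (j + 1) (minus + 1)
        ((0, 0) :: r.1, r.2)
      else
        let r := pvInnerA sentence rest (j + 1) minus
        ((off.1 - minus, off.2 - minus) :: r.1, r.2)

-- outer `for i, offsets_per_sentence in enumerate(offsets)` loop; sents[i] may raise (outside Pre_)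
def pvOuterA (sents : List String) (offsets : List (List (Int × Int))) (i : Int) (minus : Int) :
    List (List (Int × Int)) × Int :=
  match offsets with
  | [] => ([], minus)
  | ops :: rest =>
    match PySem.List.pyGet? sents i with
    | none => ([], minus)  -- IndexError in Python: outside Pre_
    | some s =>
      let r := pvInnerA s ops 0 minus
      let r2 := pvOuterA sents rest (i + 1) r.2
      (r.1 :: r2.1, r2.2)

def correct_offsets (sents : List String) (offsets : List (List (Int × Int))) :
    List String × (List (List (Int × Int))) :=
  (sents, (pvOuterA sents offsets 0 0).1)

-- ===== PORT B =====
-- flags = [c == '<' for s, ops in zip(sents, offsets) for c, _ in zip(s, ops)]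
def pvFlagsB (sents : List String) (offsets : List (List (Int × Int))) : List Bool :=
  (sents.zip offsets).flatMap (fun p => (p.1.toList.zip p.2).map (fun cq => cq.1 == '<'))

-- before = [0]; for f in flags: before.append(before[-1] + (1 if f else 0))
def pvBeforeB (flags : List Bool) : List Int :=
  flags.foldl (fun acc f => acc ++ [(acc.getLast?.getD 0) + (if f then 1 else 0)]) [0]

-- second pass: per-sentence comprehension of table lookups; flags[k+j] / before[k+j] are
-- in-range list indexings wherever B's Python returns (getD is exact there)
def correct_offsets_alt (sents : List String) (offsets : List (List (Int × Int))) :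
    List String × (List (List (Int × Int))) :=
  let flags := pvFlagsB sents offsets
  let before := pvBeforeB flags
  let r := offsets.foldl
    (fun (st : List (List (Int × Int)) × Nat) ops =>
      (st.1 ++ [(PySem.List.enumerate ops).map (fun jab =>
          if flags.getD (st.2 + jab.1.toNat) false then ((0 : Int), (0 : Int))
          else (jab.2.1 - before.getD (st.2 + jab.1.toNat) 0,
                jab.2.2 - before.getD (st.2 + jab.1.toNat) 0))],
       st.2 + ops.length)) ([], 0)
  (sents, r.1)

-- ===== PRECONDITION & SPEC =====
-- Pre_ = exactly the inputs where A returns (no IndexError): offsets has no row beyond the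
-- sentences, and no row is longer than its sentence.
def Pre_correct_offsets (sents : List String) (offsets : List (List (Int × Int))) : Prop :=
  offsets.length ≤ sents.length ∧
  ∀ p ∈ sents.zip offsets, p.2.length ≤ p.1.toList.length
instance (sents : List String) (offsets : List (List (Int × Int))) : Decidable (Pre_correct_offsets sents offsets) := by unfold Pre_correct_offsets; infer_instance

def pvWitness_correct_offsets : List String × (List (List (Int × Int))) :=
  (["a<b", "cd"], [[(0, 0), (1, 2), (2, 3)], [(4, 5)]])

def Spec_correct_offsets (sents : List String) (offsets : List (List (Int × Int))) (out : List String × (List (List (Int × Int)))) : Prop := out = correct_offsets_alt sents offsets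
instance (sents : List String) (offsets : List (List (Int × Int))) (out : List String × (List (List (Int × Int)))) : Decidable (Spec_correct_offsets sents offsets out) := by unfold Spec_correct_offsets; infer_instance

-- ===== CLAIM (what is proved, stated in full; the proofs are below) =====
def Claim_equal_correct_offsets : Prop := ∀ (sents : List String) (offsets : List (List (Int × Int))), Dom_correct_offsets sents offsets → Pre_correct_offsets sents offsets → Spec_correct_offsets sents offsets (correct_offsets sents offsets)

-- ===== LEMMAS AND PROOFS =====

-- common reference recursion: one sentence's row together with the updated minus
def pvRow (cs : List Char) (ops : List (Int × Int)) (m : Int) : List (Int × Int) × Int :=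
  match cs, ops with
  | _, [] => ([], m)
  | [], _ :: _ => ([], m)
  | c :: cs', off :: rest =>
    if c = '<' then
      let r := pvRow cs' rest (m + 1)
      ((0, 0) :: r.1, r.2)
    else
      let r := pvRow cs' rest m
      ((off.1 - m, off.2 - m) :: r.1, r.2)

def pvSpecRows (sents : List String) (offsets : List (List (Int × Int))) (m : Int) :
    List (List (Int × Int)) :=
  match sents, offsets with
  | _, [] => []
  | [], _ :: _ => []
  | s :: ss, ops :: rest =>
    let r := pvRow s.toList ops m
    r.1 :: pvSpecRows ss rest r.2

-- ---- A-side ----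
lemma pvInnerA_eq (ops : List (Int × Int)) : ∀ (s : String) (j : Nat) (m : Int),
    pvInnerA s ops (j : Int) m = pvRow (s.toList.drop j) ops m := by
  induction ops with
  | nil => intro s j m; cases s.toList.drop j <;> simp [pvInnerA, pvRow]
  | cons off rest ih =>
    intro s j m
    have hget : PySem.Str.pyGet? s (j : Int) = (s.toList.drop j).head? := by
      simp [pysem, List.head?_drop]
    cases h : s.toList.drop j with
    | nil =>
      simp only [pvInnerA, hget, h, List.head?_nil, pvRow]
    | cons c cs' =>
      have hdropsucc : s.toList.drop (j + 1) = cs' := by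
        rw [← List.tail_drop, h]; rfl
      have hj1 : (j : Int) + 1 = ((j + 1 : Nat) : Int) := by push_cast; ring
      simp only [pvInnerA, hget, h, List.head?_cons, pvRow]
      rw [hj1, ih s (j + 1), ih s (j + 1), hdropsucc]

lemma pvOuterA_eq (offsets : List (List (Int × Int))) : ∀ (sents : List String) (i : Nat) (m : Int),
    (pvOuterA sents offsets (i : Int) m).1 = pvSpecRows (sents.drop i) offsets m := by
  induction offsets with
  | nil => intro sents i m; cases sents.drop i <;> simp [pvOuterA, pvSpecRows]
  | cons ops rest ih =>
    intro sents i m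
    have hget : PySem.List.pyGet? sents (i : Int) = (sents.drop i).head? := by
      simp [pysem, List.head?_drop]
    cases h : sents.drop i with
    | nil => simp [pvOuterA, pvSpecRows, h, hget]
    | cons s ss =>
      have hdropsucc : sents.drop (i + 1) = ss := by
        rw [← List.tail_drop, h]; rfl
      have hi1 : (i : Int) + 1 = ((i + 1 : Nat) : Int) := by push_cast; ring
      have h0 : (0 : Int) = ((0 : Nat) : Int) := by norm_num
      simp only [pvOuterA, hget, h, List.head?_cons, pvSpecRows]
      rw [h0, pvInnerA_eq ops s 0, hi1, ih sents (i + 1), hdropsucc]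
      simp

-- ---- B-side ----
def pvScan (s : Int) : List Bool → List Int
  | [] => []
  | f :: fs => (s + if f then 1 else 0) :: pvScan (s + if f then 1 else 0) fs

lemma pvBefore_foldl (F : List Bool) : ∀ (acc : List Int) (s : Int), acc.getLast?.getD 0 = s →
    F.foldl (fun acc f => acc ++ [(acc.getLast?.getD 0) + (if f then 1 else 0)]) acc
      = acc ++ pvScan s F := by
  induction F with
  | nil => intro acc s _; simp [pvScan]
  | cons f fs ih =>
    intro acc s hs
    have hlast : ((acc ++ [s + if f then 1 else 0]).getLast?).getD 0 = s + if f then 1 else 0 := by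
      rw [List.getLast?_concat]; rfl
    simp only [List.foldl_cons, hs]
    rw [ih _ _ hlast, pvScan]
    simp

lemma pvScan_getD (F : List Bool) : ∀ (s : Int) (j : Nat), j < F.length →
    (pvScan s F).getD j 0 = s + (((F.take (j + 1)).count true : Nat) : Int) := by
  induction F with
  | nil => intro s j h; simp at h
  | cons f fs ih =>
    intro s j h
    cases j with
    | zero =>
      cases f <;> simp [pvScan]
    | succ j =>
      have hj : j < fs.length := by simpa using h
      have := ih (s + if f then 1 else 0) j hj
      simp only [pvScan, List.getD_cons_succ, this, List.take_succ_cons, List.count_cons]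
      cases f <;> simp
      ring

lemma pvBefore_getD (F : List Bool) (k : Nat) (hk : k ≤ F.length) :
    (pvBeforeB F).getD k 0 = (((F.take k).count true : Nat) : Int) := by
  have : pvBeforeB F = [0] ++ pvScan 0 F := pvBefore_foldl F [0] 0 rfl
  rw [this]
  cases k with
  | zero => simp
  | succ j =>
    have hj : j < F.length := by omega
    simp only [List.singleton_append, List.getD_cons_succ]
    rw [pvScan_getD F 0 j hj]
    simp

-- the reference second pass of B, parameterised by the tables
def pvRowsOf (F : List Bool) (B : List Int) :
    List (List (Int × Int)) → Nat → List (List (Int × Int))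
  | [], _ => []
  | ops :: rest, k =>
    ((PySem.List.enumerate ops).map (fun jab =>
        if F.getD (k + jab.1.toNat) false then ((0 : Int), (0 : Int))
        else (jab.2.1 - B.getD (k + jab.1.toNat) 0,
              jab.2.2 - B.getD (k + jab.1.toNat) 0)))
      :: pvRowsOf F B rest (k + ops.length)

lemma pvFold2_eq (F : List Bool) (B : List Int) (offsets : List (List (Int × Int))) :
    ∀ (acc : List (List (Int × Int))) (k : Nat),
    (offsets.foldl
      (fun (st : List (List (Int × Int)) × Nat) ops =>
        (st.1 ++ [(PySem.List.enumerate ops).map (fun jab =>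
            if F.getD (st.2 + jab.1.toNat) false then ((0 : Int), (0 : Int))
            else (jab.2.1 - B.getD (st.2 + jab.1.toNat) 0,
                  jab.2.2 - B.getD (st.2 + jab.1.toNat) 0))],
         st.2 + ops.length)) (acc, k)).1 = acc ++ pvRowsOf F B offsets k := by
  induction offsets with
  | nil => intro acc k; simp [pvRowsOf]
  | cons ops rest ih =>
    intro acc k
    simp only [List.foldl_cons, pvRowsOf]
    rw [ih]
    simp

-- one row of B equals pvRow, with the book-keeping invariant carried in P
lemma pvRow_eq (F : List Bool) (B : List Int) (hB : B = pvBeforeB F) :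
    ∀ (ops : List (Int × Int)) (cs : List Char) (P R : List Bool) (s : Nat),
    ops.length ≤ cs.length → s ≤ P.length →
    F = P ++ (cs.zip ops).map (fun cq => cq.1 == '<') ++ R →
    (((PySem.List.enumerate ops ((s : Nat) : Int)).map (fun jab =>
        if F.getD (P.length - s + jab.1.toNat) false then ((0 : Int), (0 : Int))
        else (jab.2.1 - B.getD (P.length - s + jab.1.toNat) 0,
              jab.2.2 - B.getD (P.length - s + jab.1.toNat) 0)))
      = (pvRow cs ops (((P.count true : Nat) : Int))).1)
    ∧ (pvRow cs ops (((P.count true : Nat) : Int))).2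
        = (((P.count true : Nat) : Int) + (((cs.zip ops).map (fun cq => cq.1 == '<')).count true : Nat)) := by
  intro ops
  induction ops with
  | nil =>
    intro cs P R s _ _ _
    cases cs <;> simp [PySem.List.enumerate_nil, pvRow]
  | cons off rest ih =>
    intro cs P R s hlen hs hF
    cases cs with
    | nil => simp at hlen
    | cons c cs' =>
      have hFassoc : F = P ++ ((c == '<') :: ((cs'.zip rest).map (fun cq => cq.1 == '<') ++ R)) := by
        simpa [List.zip_cons_cons, List.append_assoc] using hF
      have hlenP : P.length < F.length := by
        rw [hFassoc]; simp
      have hgetF : F.getD P.length false = (c == '<') := by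
        rw [hFassoc, List.getD_eq_getElem?_getD, List.getElem?_append_right (le_refl P.length)]
        simp
      have htakeF : F.take P.length = P := by
        rw [hFassoc]; exact List.take_left' rfl
      have hgetB : B.getD P.length 0 = ((P.count true : Nat) : Int) := by
        rw [hB, pvBefore_getD F P.length (le_of_lt hlenP), htakeF]
      have hidx : P.length - s + s = P.length := by omega
      have hcast : ((s : Nat) : Int) + 1 = (((s + 1 : Nat)) : Int) := by push_cast; ring
      have hk : P.length - s = (P ++ [(c == '<')]).length - (s + 1) := by simp
      have hF' : F = (P ++ [(c == '<')]) ++ ((cs'.zip rest).map (fun cq => cq.1 == '<')) ++ R := by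
        rw [hFassoc]; simp
      have hlen' : rest.length ≤ cs'.length := by simpa using hlen
      have hs' : s + 1 ≤ (P ++ [(c == '<')]).length := by simp; omega
      have IH := ih cs' (P ++ [(c == '<')]) R (s + 1) hlen' hs' hF'
      simp only [← hk, ← hcast] at IH
      by_cases hc : c = '<'
      · have hcnt : (((P ++ [(c == '<')]).count true : Nat) : Int)
            = ((P.count true : Nat) : Int) + 1 := by
          simp [List.count_append, hc]
        rw [hcnt] at IH
        constructor
        · simp only [PySem.List.enumerate_cons, List.map_cons, Int.toNat_natCast, hidx,
            hgetF, hgetB]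
          rw [IH.1]
          simp [pvRow, hc]
        · simp [pvRow, hc, IH.2]
          ring
      · have hcnt : (((P ++ [(c == '<')]).count true : Nat) : Int)
            = ((P.count true : Nat) : Int) := by
          simp [List.count_append, hc]
        rw [hcnt] at IH
        constructor
        · simp only [PySem.List.enumerate_cons, List.map_cons, Int.toNat_natCast, hidx,
            hgetF, hgetB]
          rw [IH.1]
          simp [pvRow, hc]
        · simp [pvRow, hc, IH.2]

lemma pvRows_eq (F : List Bool) (B : List Int) (hB : B = pvBeforeB F) :
    ∀ (offsets : List (List (Int × Int))) (sents : List String) (P : List Bool),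
    offsets.length ≤ sents.length →
    (∀ p ∈ sents.zip offsets, p.2.length ≤ p.1.toList.length) →
    F = P ++ pvFlagsB sents offsets →
    pvRowsOf F B offsets P.length = pvSpecRows sents offsets (((P.count true : Nat) : Int)) := by
  intro offsets
  induction offsets with
  | nil => intro sents P _ _ _; cases sents <;> simp [pvRowsOf, pvSpecRows]
  | cons ops rest ih =>
    intro sents P hlen hpre hF
    cases sents with
    | nil => simp at hlen
    | cons s ss =>
      have hlenops : ops.length ≤ s.toList.length := by
        have := hpre (s, ops) (by simp [List.zip_cons_cons])
        simpa using this
      have hFrow : F = P ++ (s.toList.zip ops).map (fun cq => cq.1 == '<') ++ pvFlagsB ss rest := by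
        rw [hF]; simp [pvFlagsB, List.zip_cons_cons, List.append_assoc]
      have hrow := pvRow_eq F B hB ops s.toList P (pvFlagsB ss rest) 0 hlenops (Nat.zero_le _) hFrow
      simp only [Nat.sub_zero, Nat.cast_zero] at hrow
      have hlenops' : ops.length ≤ s.length := by simpa using hlenops
      have hlenrow : ((s.toList.zip ops).map (fun cq => cq.1 == '<')).length = ops.length := by
        simp [Nat.min_eq_right hlenops']
      have hm2 : (pvRow s.toList ops (((P.count true : Nat) : Int))).2
          = ((((P ++ (s.toList.zip ops).map (fun cq => cq.1 == '<')).count true : Nat)) : Int) := by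
        rw [hrow.2, List.count_append]
        push_cast
        ring
      have hF2 : F = (P ++ (s.toList.zip ops).map (fun cq => cq.1 == '<')) ++ pvFlagsB ss rest := by
        rw [hFrow]
      have hpre2 : ∀ p ∈ ss.zip rest, p.2.length ≤ p.1.toList.length := by
        intro p hp
        exact hpre p (by simp [List.zip_cons_cons, hp])
      have hlen2 : rest.length ≤ ss.length := by simpa using hlen
      have IH := ih ss (P ++ (s.toList.zip ops).map (fun cq => cq.1 == '<')) hlen2 hpre2 hF2
      simp only [List.length_append, hlenrow] at IH
      simp only [pvRowsOf, pvSpecRows]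
      congr 1
      · exact hrow.1
      · rw [hm2, ← IH]

-- ===== VERDICT (by name: the statement is the Claim_ definition above) =====
theorem correct_offsets_spec : Claim_equal_correct_offsets := by
  intro sents offsets _ hpre
  unfold Spec_correct_offsets correct_offsets correct_offsets_alt
  have hA : (pvOuterA sents offsets ((0 : Nat) : Int) 0).1 = pvSpecRows sents offsets 0 := by
    rw [pvOuterA_eq offsets sents 0 0]
    simp
  have hfold := pvFold2_eq (pvFlagsB sents offsets) (pvBeforeB (pvFlagsB sents offsets))
    offsets [] 0
  have hrows := pvRows_eq (pvFlagsB sents offsets) (pvBeforeB (pvFlagsB sents offsets)) rfl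
    offsets sents [] hpre.1 hpre.2 (by simp)
  simp only [List.length_nil, List.count_nil, Nat.cast_zero] at hrows
  simp only [Nat.cast_zero] at hA
  rw [Prod.mk.injEq]
  refine ⟨rfl, ?_⟩
  rw [hA, hfold, List.nil_append, hrows]
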